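-- pv_equiv track=rewrite | github.com/DimoDimov99/python-problems | solutions/nan_expand.py | nan_expand
-- ===== SOURCE A (Python) =====
-- def nan_expand(times):
--     not_a = []
--     if times <= 0:
--         return ""
--     for _ in range(times):
--         not_a.append("Not a ")
--     not_a.append("NaN")
--
--     return "".join(not_a)
-- ===== SOURCE B (Python) =====
-- def nan_expand(times):
--     if times <= 0:
--         return ""
--     # Build "Not a " repeated `times` times by binary doubling:
--     # O(log times) concatenation steps instead of one append per repetition.
--     result = ""
--     piece = "Not a "
--     n = times
--     while n > 0:
--         if n & 1:
--             result += piece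
--         piece += piece
--         n >>= 1
--     return result + "NaN"
-- ===== Notes on version B (the rewrite author's own statement) =====
-- stated objective: alternative
-- what changed: Replaced the one-append-per-repetition loop plus join with binary doubling (square-and-multiply on strings): the repeated piece is doubled while the exponent is halved, assembling the result in O(log times) concatenation steps instead of O(times) appends.
import Mathlib
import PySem

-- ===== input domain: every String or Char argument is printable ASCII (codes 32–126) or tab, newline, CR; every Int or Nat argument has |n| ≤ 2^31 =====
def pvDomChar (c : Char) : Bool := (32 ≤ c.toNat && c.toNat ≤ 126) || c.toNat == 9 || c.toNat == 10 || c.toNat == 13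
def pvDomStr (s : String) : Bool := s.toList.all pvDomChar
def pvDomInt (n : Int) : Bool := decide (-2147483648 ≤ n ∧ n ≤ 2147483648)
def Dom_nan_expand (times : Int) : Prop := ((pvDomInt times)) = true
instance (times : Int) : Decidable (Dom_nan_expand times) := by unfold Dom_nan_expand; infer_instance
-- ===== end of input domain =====

-- B replaces A's one-append-per-repetition loop + join with binary doubling
-- (square-and-multiply on strings, O(log times) concatenations); objective: alternative.

-- ===== PORT A =====
def nan_expand (times : Int) : String :=
  let not_a : List String := []
  if times ≤ 0 then ""
  else
    let not_a := (PySem.List.pyRange 0 times 1).foldl (fun acc _ => acc ++ ["Not a "]) not_a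
    let not_a := not_a ++ ["NaN"]
    PySem.Str.join "" not_a

-- ===== PORT B =====
-- B's while loop: `while n > 0: if n & 1: result += piece; piece += piece; n >>= 1`.
-- The loop runs only with n = times > 0, so its int counter is carried as the Nat times.toNat
-- (n & 1 = n % 2 and n >>= 1 = n / 2 on nonnegative n, exactly Python's values there).
def nanDouble (result piece : List Char) (n : Nat) : List Char :=
  if n = 0 then result
  else nanDouble (if n % 2 = 1 then result ++ piece else result) (piece ++ piece) (n / 2)

def nan_expand_alt (times : Int) : String :=
  if times ≤ 0 then ""
  else String.ofList (nanDouble [] "Not a ".toList times.toNat ++ "NaN".toList)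

-- ===== PRECONDITION & SPEC =====
def Spec_nan_expand (times : Int) (out : String) : Prop := out = nan_expand_alt times
instance (times : Int) (out : String) : Decidable (Spec_nan_expand times out) := by unfold Spec_nan_expand; infer_instance

-- ===== CLAIM (what is proved, stated in full; the proofs are below) =====
def Claim_equal_nan_expand : Prop := ∀ (times : Int), Dom_nan_expand times → Spec_nan_expand times (nan_expand times)

-- ===== LEMMAS AND PROOFS =====

-- Doubling the repeated block halves the needed count.
lemma flatten_replicate_double {α : Type} (k : Nat) (p : List α) :
    (List.replicate k (p ++ p)).flatten = (List.replicate (2 * k) p).flatten := by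
  induction k with
  | zero => rfl
  | succ k ih =>
      have : 2 * (k + 1) = (2 * k) + 1 + 1 := by omega
      simp [this, List.replicate_succ, ih, List.append_assoc]

-- The binary-doubling loop builds exactly n copies of the piece after the result.
lemma nanDouble_eq (n : Nat) : ∀ (result piece : List Char),
    nanDouble result piece n = result ++ (List.replicate n piece).flatten := by
  induction n using Nat.strong_induction_on with
  | _ n ih =>
      intro result piece
      by_cases h0 : n = 0
      · simp [nanDouble, h0]
      · rw [nanDouble, if_neg h0, ih (n / 2) (by omega)]
        rw [flatten_replicate_double]
        by_cases hpar : n % 2 = 1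
        · have h2 : n = 2 * (n / 2) + 1 := by omega
          rw [if_pos hpar]
          conv_rhs => rw [h2]
          simp [List.replicate_succ, List.append_assoc]
        · have h2 : 2 * (n / 2) = n := by omega
          rw [if_neg hpar, h2]

lemma flatten_intersperse_nil {α : Type} (l : List (List α)) :
    (List.intersperse ([] : List α) l).flatten = l.flatten := by
  induction l with
  | nil => rfl
  | cons h t ih => cases t <;> simp_all [List.intersperse]

-- ===== VERDICT (by name: the statement is the Claim_ definition above) =====
theorem nan_expand_spec : Claim_equal_nan_expand := by
  intro times _
  show nan_expand times = nan_expand_alt times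
  by_cases h : times ≤ 0
  · simp [nan_expand, nan_expand_alt, h]
  · simp only [nan_expand, nan_expand_alt, if_neg h]
    rw [PySem.List.foldl_append_singleton_eq_map, nanDouble_eq]
    rw [← String.toList_inj]
    simp only [PySem.Str.toList_join, PySem.Chars.join, String.toList_ofList,
      List.nil_append, List.map_append, List.map_map, List.intercalate]
    simp [flatten_intersperse_nil, List.flatten_append, Function.comp_def,
      List.map_const', PySem.List.length_pyRange_one]
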